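-- pv_equiv track=rewrite | github.com/nekotxt/ComfyUI-NTX-support-nodes | scripts/scan_models.py | _order_data
-- ===== SOURCE A (Python) =====
-- def _order_data(data:dict):
--     # force an order for the dict keys
--     ordered_data = {}
--     list_of_std_keys = ["id", "model_type", "hash", "model", "prompts", "download", "notes"]
--     # - add standard keys in the given order
--     for k in list_of_std_keys:
--         if k in data:
--             ordered_data[k] = data[k]
--     # - add other keys as they appear in the original dict
--     for k in data:
--         if not(k in list_of_std_keys):
--             ordered_data[k] = data[k]
--     return ordered_data
-- ===== SOURCE B (Python) =====
-- def _order_data(data: dict):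
--     std_keys = ["id", "model_type", "hash", "model", "prompts", "download", "notes"]
--     order = {k: i for i, k in enumerate(std_keys)}
--     return {k: data[k] for k in sorted(data, key=lambda k: order.get(k, len(order)))}
-- ===== Notes on version B (the rewrite author's own statement) =====
-- stated objective: idiomatic
-- what changed: A builds the result in two filtering passes (standard keys looked up one by one, then the remaining keys); B builds a rank table once and does a single stable sort of the keys by rank, relying on sort stability to keep non-standard keys in insertion order.
import Mathlib
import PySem

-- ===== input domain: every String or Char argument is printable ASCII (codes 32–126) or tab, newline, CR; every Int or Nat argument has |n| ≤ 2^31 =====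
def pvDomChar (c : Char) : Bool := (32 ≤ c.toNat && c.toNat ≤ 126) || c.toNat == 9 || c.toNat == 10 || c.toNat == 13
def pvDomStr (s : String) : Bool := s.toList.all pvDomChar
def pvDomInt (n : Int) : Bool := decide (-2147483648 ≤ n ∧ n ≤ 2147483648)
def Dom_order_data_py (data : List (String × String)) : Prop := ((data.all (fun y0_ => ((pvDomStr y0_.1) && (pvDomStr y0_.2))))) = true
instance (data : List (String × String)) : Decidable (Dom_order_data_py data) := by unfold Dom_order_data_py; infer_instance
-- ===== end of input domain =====

-- B replaces A's two filtering passes by one rank table plus a single stable sort of the keys (more idiomatic; same return value).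

-- ===== PORT A =====
def pvStdKeys : List String := ["id", "model_type", "hash", "model", "prompts", "download", "notes"]

def order_data_py (data : List (String × String)) : List (String × String) :=
  let d : PySem.Dict String String := PySem.Dict.mk data
  -- for k in list_of_std_keys: if k in data: ordered_data[k] = data[k]
  let od1 := pvStdKeys.foldl (fun acc k =>
      match d.get? k with
      | some v => acc.insert k v
      | none => acc) PySem.Dict.empty
  -- for k in data: if not(k in list_of_std_keys): ordered_data[k] = data[k]
  let od2 := d.keys.foldl (fun acc k =>
      if ¬ (k ∈ pvStdKeys) then
        match d.get? k with
        | some v => acc.insert k v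
        | none => acc
      else acc) od1
  od2.items

-- ===== PORT B =====
def order_data_py_alt (data : List (String × String)) : List (String × String) :=
  let d : PySem.Dict String String := PySem.Dict.mk data
  let stdKeys : List String := ["id", "model_type", "hash", "model", "prompts", "download", "notes"]
  -- order = {k: i for i, k in enumerate(std_keys)}
  let order : PySem.Dict String Int :=
    (PySem.List.enumerate stdKeys).foldl (fun acc p => acc.insert p.2 p.1) PySem.Dict.empty
  -- sorted(data, key=lambda k: order.get(k, len(order)))
  let ks := PySem.List.sorted d.keys (fun k => order.getD k (PySem.List.len stdKeys)) false
  -- {k: data[k] for k in ks}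
  (ks.foldl (fun acc k =>
      match d.get? k with
      | some v => acc.insert k v
      | none => acc) PySem.Dict.empty).items

-- ===== PRECONDITION & SPEC =====
-- Pre_ excludes association lists with duplicate keys: the parameter ports a Python dict, which cannot hold them.
def Pre_order_data_py (data : List (String × String)) : Prop := (data.map Prod.fst).Nodup
instance (data : List (String × String)) : Decidable (Pre_order_data_py data) := by unfold Pre_order_data_py; infer_instance
def pvWitness_order_data_py : (List (String × String)) := [("model", "m.ckpt"), ("extra", "1"), ("id", "7")]

def Spec_order_data_py (data : List (String × String)) (out : List (String × String)) : Prop := out = order_data_py_alt data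
instance (data : List (String × String)) (out : List (String × String)) : Decidable (Spec_order_data_py data out) := by unfold Spec_order_data_py; infer_instance

-- ===== CLAIM (what is proved, stated in full; the proofs are below) =====
def Claim_equal_order_data_py : Prop := ∀ (data : List (String × String)), Dom_order_data_py data → Pre_order_data_py data → Spec_order_data_py data (order_data_py data)

-- ===== LEMMAS AND PROOFS =====

-- 'insert the key if it is found' as a function: both ports' dict-building loops append these pairs
def pvG (d : PySem.Dict String String) (k : String) : Option (String × String) :=
  (d.get? k).map (fun v => (k, v))

-- the rank B's `order.get(k, len(order))` computes, written out
def pvRank (k : String) : Int :=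
  if k = "id" then 0 else if k = "model_type" then 1 else if k = "hash" then 2
  else if k = "model" then 3 else if k = "prompts" then 4 else if k = "download" then 5
  else if k = "notes" then 6 else 7

def pvBucket (i : Int) (xs : List String) : List String := xs.filter (fun k => pvRank k = i)

def pvBuckets (xs : List String) : List String :=
  pvBucket 0 xs ++ pvBucket 1 xs ++ pvBucket 2 xs ++ pvBucket 3 xs ++
  pvBucket 4 xs ++ pvBucket 5 xs ++ pvBucket 6 xs ++ pvBucket 7 xs

theorem pv_rank_eq (k : String) :
    (((PySem.List.enumerate ["id", "model_type", "hash", "model", "prompts", "download", "notes"]).foldl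
        (fun acc p => acc.insert p.2 p.1) PySem.Dict.empty : PySem.Dict String Int)).getD k
      (PySem.List.len ["id", "model_type", "hash", "model", "prompts", "download", "notes"]) = pvRank k := by
  have h : (((PySem.List.enumerate ["id", "model_type", "hash", "model", "prompts", "download", "notes"]).foldl
        (fun acc p => acc.insert p.2 p.1) PySem.Dict.empty : PySem.Dict String Int))
      = PySem.Dict.mk [("id",0),("model_type",1),("hash",2),("model",3),("prompts",4),("download",5),("notes",6)] := by decide
  rw [h]; clear h
  simp only [PySem.Dict.getD_eq_get?_getD, PySem.Dict.get?_mk_cons, PySem.List.len]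
  unfold pvRank
  split_ifs <;> simp_all [PySem.Dict.get?]

theorem pv_insertBy_middle {α : Type} (before : α → α → Bool) (x : α) :
    ∀ (l1 l2 : List α), (∀ a ∈ l1, before x a = false) → (∀ a ∈ l2, before x a = true) →
      PySem.List.insertBy before x (l1 ++ l2) = l1 ++ x :: l2 := by
  intro l1
  induction l1 with
  | nil =>
    intro l2 _ h2
    cases l2 with
    | nil => simp [PySem.List.insertBy]
    | cons a t => simp [PySem.List.insertBy, h2 a (by simp)]
  | cons a t ih =>
    intro l2 h1 h2
    simp only [List.cons_append, PySem.List.insertBy, h1 a (by simp)]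
    simp [ih l2 (fun b hb => h1 b (by simp [hb])) h2]

theorem pv_filter_eq_of_nodup (a : String) :
    ∀ (xs : List String), xs.Nodup → xs.filter (fun k => k = a) = if a ∈ xs then [a] else [] := by
  intro xs
  induction xs with
  | nil => simp
  | cons x t ih =>
    intro hnd
    by_cases hx : x = a
    · subst hx
      have : x ∉ t := (List.nodup_cons.mp hnd).1
      have ht : List.filter (fun k => decide (k = x)) t = [] :=
        List.filter_eq_nil_iff.mpr (fun b hb => by simp; rintro rfl; exact this hb)
      simp [ht]
    · simp [hx, ih (List.nodup_cons.mp hnd).2, List.mem_cons, Ne.symm hx]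

theorem pv_fold_insert_get (d : PySem.Dict String String) :
    ∀ (ks : List String) (acc : PySem.Dict String String), ks.Nodup →
      (∀ k ∈ ks, acc.contains k = false) →
      (ks.foldl (fun acc k =>
          match d.get? k with
          | some v => acc.insert k v
          | none => acc) acc).items = acc.items ++ ks.filterMap (pvG d) := by
  intro ks
  induction ks with
  | nil => simp
  | cons k t ih =>
    intro acc hnd hfr
    simp only [List.foldl_cons]
    cases hg : d.get? k with
    | none =>
      rw [ih acc (List.nodup_cons.mp hnd).2 (fun k' hk' => hfr k' (by simp [hk']))]
      simp [pvG, hg]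
    | some v =>
      have hfrk : acc.contains k = false := hfr k (by simp)
      have hit : (acc.insert k v).items = acc.items ++ [(k, v)] :=
        PySem.Dict.items_insert_of_not_contains acc v hfrk
      have hfr' : ∀ k' ∈ t, (acc.insert k v).contains k' = false := by
        intro k' hk'
        rw [PySem.Dict.contains_insert]
        have hne : k' ≠ k := by
          rintro rfl; exact (List.nodup_cons.mp hnd).1 hk'
        simp [hne, hfr k' (by simp [hk'])]
      rw [ih (acc.insert k v) (List.nodup_cons.mp hnd).2 hfr', hit]
      simp [pvG, hg]

theorem pv_fold_insert_get_if (d : PySem.Dict String String) :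
    ∀ (ks : List String) (acc : PySem.Dict String String), ks.Nodup →
      (∀ k ∈ ks, ¬ (k ∈ pvStdKeys) → acc.contains k = false) →
      (ks.foldl (fun acc k =>
          if ¬ (k ∈ pvStdKeys) then
            match d.get? k with
            | some v => acc.insert k v
            | none => acc
          else acc) acc).items
        = acc.items ++ ks.filterMap (fun k => if ¬ (k ∈ pvStdKeys) then pvG d k else none) := by
  intro ks
  induction ks with
  | nil => simp
  | cons k t ih =>
    intro acc hnd hfr
    simp only [List.foldl_cons]
    by_cases hs : k ∈ pvStdKeys
    · rw [show (if ¬ (k ∈ pvStdKeys) then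
            match d.get? k with
            | some v => acc.insert k v
            | none => acc
          else acc) = acc by simp [hs]]
      rw [ih acc (List.nodup_cons.mp hnd).2 (fun k' hk' h' => hfr k' (by simp [hk']) h')]
      simp [hs]
    · simp only [hs, not_false_eq_true, if_true]
      cases hg : d.get? k with
      | none =>
        rw [ih acc (List.nodup_cons.mp hnd).2 (fun k' hk' h' => hfr k' (by simp [hk']) h')]
        simp [pvG, hg, hs]
      | some v =>
        have hfrk : acc.contains k = false := hfr k (by simp) hs
        have hit : (acc.insert k v).items = acc.items ++ [(k, v)] :=
          PySem.Dict.items_insert_of_not_contains acc v hfrk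
        have hfr' : ∀ k' ∈ t, ¬ (k' ∈ pvStdKeys) → (acc.insert k v).contains k' = false := by
          intro k' hk' h'
          rw [PySem.Dict.contains_insert]
          have hne : k' ≠ k := by
            rintro rfl; exact (List.nodup_cons.mp hnd).1 hk'
          simp [hne, hfr k' (by simp [hk']) h']
        rw [ih (acc.insert k v) (List.nodup_cons.mp hnd).2 hfr', hit]
        simp [pvG, hg, hs]

theorem pv_rank_cases (k : String) :
    pvRank k = 0 ∨ pvRank k = 1 ∨ pvRank k = 2 ∨ pvRank k = 3 ∨ pvRank k = 4 ∨
    pvRank k = 5 ∨ pvRank k = 6 ∨ pvRank k = 7 := by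
  unfold pvRank; split_ifs <;> simp

theorem pv_sorted_eq_buckets (xs : List String) :
    PySem.List.sorted xs pvRank false = pvBuckets xs := by
  rw [PySem.List.sorted_eq_foldl_insertBy]
  induction xs using List.reverseRecOn with
  | nil => simp [pvBuckets, pvBucket]
  | append_singleton xs x ih =>
    rw [List.foldl_append, List.foldl_cons, List.foldl_nil, ih]
    have hbk : ∀ (i : Int), pvBucket i (xs ++ [x]) =
        pvBucket i xs ++ if pvRank x = i then [x] else [] := by
      intro i
      simp only [pvBucket, List.filter_append]
      congr 1
      by_cases h : pvRank x = i <;> simp [h]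
    have hmem : ∀ (i : Int) (a : String), a ∈ pvBucket i xs → pvRank a = i := by
      intro i a ha
      simpa [pvBucket] using (List.mem_filter.mp ha).2
    rcases pv_rank_cases x with hj | hj | hj | hj | hj | hj | hj | hj
    · have main := pv_insertBy_middle (fun a b => decide (pvRank a < pvRank b)) x
        (pvBucket 0 xs) (pvBucket 1 xs ++ pvBucket 2 xs ++ pvBucket 3 xs ++ pvBucket 4 xs ++ pvBucket 5 xs ++ pvBucket 6 xs ++ pvBucket 7 xs)
        (by
          intro a ha
          have h := ha
          all_goals (have hr := hmem _ _ h; simp [hj, hr]))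
        (by
          intro a ha
          simp only [List.append_assoc, List.mem_append] at ha
          rcases ha with h | h | h | h | h | h | h
          all_goals (have hr := hmem _ _ h; simp [hj, hr]))
      simp only [pvBuckets, hbk, hj]
      norm_num
      simp only [List.append_assoc] at main ⊢
      simpa using main
    · have main := pv_insertBy_middle (fun a b => decide (pvRank a < pvRank b)) x
        (pvBucket 0 xs ++ pvBucket 1 xs) (pvBucket 2 xs ++ pvBucket 3 xs ++ pvBucket 4 xs ++ pvBucket 5 xs ++ pvBucket 6 xs ++ pvBucket 7 xs)
        (by
          intro a ha
          simp only [List.mem_append] at ha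
          rcases ha with h | h
          all_goals (have hr := hmem _ _ h; simp [hj, hr]))
        (by
          intro a ha
          simp only [List.append_assoc, List.mem_append] at ha
          rcases ha with h | h | h | h | h | h
          all_goals (have hr := hmem _ _ h; simp [hj, hr]))
      simp only [pvBuckets, hbk, hj]
      norm_num
      simp only [List.append_assoc] at main ⊢
      simpa using main
    · have main := pv_insertBy_middle (fun a b => decide (pvRank a < pvRank b)) x
        (pvBucket 0 xs ++ pvBucket 1 xs ++ pvBucket 2 xs) (pvBucket 3 xs ++ pvBucket 4 xs ++ pvBucket 5 xs ++ pvBucket 6 xs ++ pvBucket 7 xs)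
        (by
          intro a ha
          simp only [List.append_assoc, List.mem_append] at ha
          rcases ha with h | h | h
          all_goals (have hr := hmem _ _ h; simp [hj, hr]))
        (by
          intro a ha
          simp only [List.append_assoc, List.mem_append] at ha
          rcases ha with h | h | h | h | h
          all_goals (have hr := hmem _ _ h; simp [hj, hr]))
      simp only [pvBuckets, hbk, hj]
      norm_num
      simp only [List.append_assoc] at main ⊢
      simpa using main
    · have main := pv_insertBy_middle (fun a b => decide (pvRank a < pvRank b)) x
        (pvBucket 0 xs ++ pvBucket 1 xs ++ pvBucket 2 xs ++ pvBucket 3 xs) (pvBucket 4 xs ++ pvBucket 5 xs ++ pvBucket 6 xs ++ pvBucket 7 xs)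
        (by
          intro a ha
          simp only [List.append_assoc, List.mem_append] at ha
          rcases ha with h | h | h | h
          all_goals (have hr := hmem _ _ h; simp [hj, hr]))
        (by
          intro a ha
          simp only [List.append_assoc, List.mem_append] at ha
          rcases ha with h | h | h | h
          all_goals (have hr := hmem _ _ h; simp [hj, hr]))
      simp only [pvBuckets, hbk, hj]
      norm_num
      simp only [List.append_assoc] at main ⊢
      simpa using main
    · have main := pv_insertBy_middle (fun a b => decide (pvRank a < pvRank b)) x
        (pvBucket 0 xs ++ pvBucket 1 xs ++ pvBucket 2 xs ++ pvBucket 3 xs ++ pvBucket 4 xs) (pvBucket 5 xs ++ pvBucket 6 xs ++ pvBucket 7 xs)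
        (by
          intro a ha
          simp only [List.append_assoc, List.mem_append] at ha
          rcases ha with h | h | h | h | h
          all_goals (have hr := hmem _ _ h; simp [hj, hr]))
        (by
          intro a ha
          simp only [List.append_assoc, List.mem_append] at ha
          rcases ha with h | h | h
          all_goals (have hr := hmem _ _ h; simp [hj, hr]))
      simp only [pvBuckets, hbk, hj]
      norm_num
      simp only [List.append_assoc] at main ⊢
      simpa using main
    · have main := pv_insertBy_middle (fun a b => decide (pvRank a < pvRank b)) x
        (pvBucket 0 xs ++ pvBucket 1 xs ++ pvBucket 2 xs ++ pvBucket 3 xs ++ pvBucket 4 xs ++ pvBucket 5 xs) (pvBucket 6 xs ++ pvBucket 7 xs)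
        (by
          intro a ha
          simp only [List.append_assoc, List.mem_append] at ha
          rcases ha with h | h | h | h | h | h
          all_goals (have hr := hmem _ _ h; simp [hj, hr]))
        (by
          intro a ha
          simp only [List.mem_append] at ha
          rcases ha with h | h
          all_goals (have hr := hmem _ _ h; simp [hj, hr]))
      simp only [pvBuckets, hbk, hj]
      norm_num
      simp only [List.append_assoc] at main ⊢
      simpa using main
    · have main := pv_insertBy_middle (fun a b => decide (pvRank a < pvRank b)) x
        (pvBucket 0 xs ++ pvBucket 1 xs ++ pvBucket 2 xs ++ pvBucket 3 xs ++ pvBucket 4 xs ++ pvBucket 5 xs ++ pvBucket 6 xs) (pvBucket 7 xs)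
        (by
          intro a ha
          simp only [List.append_assoc, List.mem_append] at ha
          rcases ha with h | h | h | h | h | h | h
          all_goals (have hr := hmem _ _ h; simp [hj, hr]))
        (by
          intro a ha
          have h := ha
          all_goals (have hr := hmem _ _ h; simp [hj, hr]))
      simp only [pvBuckets, hbk, hj]
      norm_num
      simp only [List.append_assoc] at main ⊢
      simpa using main
    · have main := pv_insertBy_middle (fun a b => decide (pvRank a < pvRank b)) x
        (pvBucket 0 xs ++ pvBucket 1 xs ++ pvBucket 2 xs ++ pvBucket 3 xs ++ pvBucket 4 xs ++ pvBucket 5 xs ++ pvBucket 6 xs ++ pvBucket 7 xs) (([] : List String))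
        (by
          intro a ha
          simp only [List.append_assoc, List.mem_append] at ha
          rcases ha with h | h | h | h | h | h | h | h
          all_goals (have hr := hmem _ _ h; simp [hj, hr]))
        (by
          intro a ha
          simp at ha)
      simp only [pvBuckets, hbk, hj]
      norm_num
      simp only [List.append_assoc] at main ⊢
      simpa using main

theorem pv_rank_iff_0 (k : String) : pvRank k = 0 ↔ k = "id" := by
  unfold pvRank; split_ifs <;> simp_all

theorem pv_rank_iff_1 (k : String) : pvRank k = 1 ↔ k = "model_type" := by
  unfold pvRank; split_ifs <;> simp_all

theorem pv_rank_iff_2 (k : String) : pvRank k = 2 ↔ k = "hash" := by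
  unfold pvRank; split_ifs <;> simp_all

theorem pv_rank_iff_3 (k : String) : pvRank k = 3 ↔ k = "model" := by
  unfold pvRank; split_ifs <;> simp_all

theorem pv_rank_iff_4 (k : String) : pvRank k = 4 ↔ k = "prompts" := by
  unfold pvRank; split_ifs <;> simp_all

theorem pv_rank_iff_5 (k : String) : pvRank k = 5 ↔ k = "download" := by
  unfold pvRank; split_ifs <;> simp_all

theorem pv_rank_iff_6 (k : String) : pvRank k = 6 ↔ k = "notes" := by
  unfold pvRank; split_ifs <;> simp_all

theorem pv_rank7_iff (k : String) : pvRank k = 7 ↔ ¬ (k ∈ pvStdKeys) := by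
  unfold pvRank pvStdKeys; split_ifs <;> simp_all


theorem pv_filterMap_cons {α β : Type} (f : α → Option β) (a : α) (l : List α) :
    List.filterMap f (a :: l) = (f a).toList ++ List.filterMap f l := by
  cases h : f a <;> simp [h]

theorem pv_bucket_piece (d : PySem.Dict String String) (xs : List String)
    (hk : d.keys = xs) (hnd : xs.Nodup) (i : Int) (a : String)
    (ha : ∀ k, pvRank k = i ↔ k = a) :
    (pvBucket i xs).filterMap (pvG d) = (pvG d a).toList := by
  have hb : pvBucket i xs = if a ∈ xs then [a] else [] := by
    unfold pvBucket
    rw [show (fun k => decide (pvRank k = i)) = (fun k => decide (k = a)) from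
      funext fun k => by simp [ha]]
    exact pv_filter_eq_of_nodup a xs hnd
  rw [hb]
  by_cases hmem : a ∈ xs
  · simp only [hmem, if_true]
    rw [pv_filterMap_cons]
    simp
  · have hnone : d.get? a = none := by
      rw [PySem.Dict.get?_eq_none_iff_not_mem_keys, hk]; exact hmem
    simp [hmem, pvG, hnone]

theorem pv_main (data : List (String × String)) (hpre : (data.map Prod.fst).Nodup) :
    order_data_py data = order_data_py_alt data := by
  unfold order_data_py order_data_py_alt
  dsimp only
  set d : PySem.Dict String String := PySem.Dict.mk data with hd
  have hk : d.keys = data.map Prod.fst := rfl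
  have hnd : d.keys.Nodup := by rw [hk]; exact hpre
  -- A side
  have hstep1 := pv_fold_insert_get d pvStdKeys PySem.Dict.empty (by decide)
      (fun k _ => PySem.Dict.contains_empty k)
  have hsub : ∀ k ∈ (pvStdKeys.filterMap (pvG d)).map Prod.fst, k ∈ pvStdKeys := by
    intro k hkmem
    simp only [List.mem_map, List.mem_filterMap] at hkmem
    obtain ⟨p, ⟨a, ha, hpa⟩, hp1⟩ := hkmem
    unfold pvG at hpa
    cases hg : d.get? a with
    | none => rw [hg] at hpa; simp at hpa
    | some v => rw [hg] at hpa; simp at hpa; subst hpa; simpa [← hp1] using ha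
  have hfresh2 : ∀ k ∈ d.keys, ¬ (k ∈ pvStdKeys) →
      (pvStdKeys.foldl (fun acc k =>
          match d.get? k with
          | some v => acc.insert k v
          | none => acc) PySem.Dict.empty).contains k = false := by
    intro k _ hks
    rw [PySem.Dict.contains_eq_decide_mem_keys]
    have : (pvStdKeys.foldl (fun acc k =>
        match d.get? k with
        | some v => acc.insert k v
        | none => acc) PySem.Dict.empty).keys = (pvStdKeys.filterMap (pvG d)).map Prod.fst := by
      show ((pvStdKeys.foldl _ PySem.Dict.empty).items).map Prod.fst = _
      rw [hstep1]; simp [PySem.Dict.empty]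
    rw [this]
    simp only [decide_eq_false_iff_not]
    intro hmem; exact hks (hsub k hmem)
  have hstep2 := pv_fold_insert_get_if d d.keys _ hnd hfresh2
  -- B side
  have hkeyfun : (fun k => (((PySem.List.enumerate ["id", "model_type", "hash", "model", "prompts", "download", "notes"]).foldl
        (fun acc p => acc.insert p.2 p.1) PySem.Dict.empty : PySem.Dict String Int)).getD k
      (PySem.List.len ["id", "model_type", "hash", "model", "prompts", "download", "notes"])) = pvRank :=
    funext pv_rank_eq
  have hperm : (pvBuckets d.keys).Perm d.keys := by
    rw [← pv_sorted_eq_buckets]; exact PySem.List.sorted_perm d.keys pvRank false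
  have hndB : (pvBuckets d.keys).Nodup := hperm.nodup_iff.mpr hnd
  have hstep3 := pv_fold_insert_get d (pvBuckets d.keys) PySem.Dict.empty hndB
      (fun k _ => PySem.Dict.contains_empty k)
  -- assemble
  rw [hstep2, hstep1, hkeyfun, pv_sorted_eq_buckets, hstep3]
  simp only [PySem.Dict.empty, List.nil_append]
  have hb7 : pvBucket 7 d.keys = d.keys.filter (fun k => ¬ (k ∈ pvStdKeys)) := by
    unfold pvBucket
    apply List.filter_congr
    intro k _
    simp [pv_rank7_iff]
  have h0 := pv_bucket_piece d d.keys rfl hnd 0 "id" pv_rank_iff_0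
  have h1 := pv_bucket_piece d d.keys rfl hnd 1 "model_type" pv_rank_iff_1
  have h2 := pv_bucket_piece d d.keys rfl hnd 2 "hash" pv_rank_iff_2
  have h3 := pv_bucket_piece d d.keys rfl hnd 3 "model" pv_rank_iff_3
  have h4 := pv_bucket_piece d d.keys rfl hnd 4 "prompts" pv_rank_iff_4
  have h5 := pv_bucket_piece d d.keys rfl hnd 5 "download" pv_rank_iff_5
  have h6 := pv_bucket_piece d d.keys rfl hnd 6 "notes" pv_rank_iff_6
  unfold pvBuckets
  simp only [List.filterMap_append]
  rw [h0, h1, h2, h3, h4, h5, h6, hb7, List.filterMap_filter]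
  simp only [pvStdKeys, pv_filterMap_cons, List.filterMap_nil, List.append_nil]
  simp [List.append_assoc]

-- ===== VERDICT (by name: the statement is the Claim_ definition above) =====
theorem order_data_py_spec : Claim_equal_order_data_py := by
  intro data _ hpre
  unfold Spec_order_data_py
  exact pv_main data hpre
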